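-- pv_equiv track=rewrite | github.com/truffet/backtest_engine | indicators/RSI/rsi_calculator.py | updown_calculator
-- ===== SOURCE A (Python) =====
-- def updown_calculator(data):
-- 	i, j = 0, len(data)
-- 	upMoves, downMoves = [], []
-- 	up, down = 0, 0
-- 	while(i<j):
-- 		if (data[i][0] == None):
-- 			upMoves.append(None)
-- 			downMoves.append(None)
-- 		else:
-- 			count = 1
-- 			while(i-count > 0 and data[i-count][0] == None):
-- 				count+=1
-- 			if (i-count < 0):
-- 				upMoves.append(None)
-- 				downMoves.append(None)
-- 			else:
-- 				close = data[i][0]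
-- 				prev_close = data[i-count][0]
-- 				if (close == prev_close):
-- 					up = 0
-- 					down = 0
-- 				elif (close > prev_close):
-- 					up = close - prev_close
-- 					down = 0
-- 				else:
-- 					up = 0
-- 					down = prev_close - close
-- 				upMoves.append(up)
-- 				downMoves.append(down)
-- 		i+=1
-- 	return(upMoves, downMoves)
-- ===== SOURCE B (Python) =====
-- def updown_calculator(data):
--     upMoves, downMoves = [], []
--     prev = None
--     for row in data:
--         close = row[0]
--         if close is None or prev is None:
--             upMoves.append(None)
--             downMoves.append(None)
--         else:
--             upMoves.append(max(close - prev, 0))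
--             downMoves.append(max(prev - close, 0))
--         if close is not None:
--             prev = close
--     return (upMoves, downMoves)
-- ===== Notes on version B (the rewrite author's own statement) =====
-- stated objective: simpler
-- what changed: B replaces A's indexed while-loop with a per-element backward rescan for the previous non-None close by a single forward pass that carries the last non-None close in a variable, and replaces the three-way comparison by max(diff,0).
-- crash fix: On inputs whose first row's close is None but some later row has a non-None close, A raises TypeError (it compares that close with None found at index 0); B returns None moves up to the first non-None close and real moves afterwards. — e.g. on updown_calculator([[none], [some 5], [some 3]]): A raises TypeError, B returns ([none, none, some 0], [none, none, some 2])
import Mathlib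
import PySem

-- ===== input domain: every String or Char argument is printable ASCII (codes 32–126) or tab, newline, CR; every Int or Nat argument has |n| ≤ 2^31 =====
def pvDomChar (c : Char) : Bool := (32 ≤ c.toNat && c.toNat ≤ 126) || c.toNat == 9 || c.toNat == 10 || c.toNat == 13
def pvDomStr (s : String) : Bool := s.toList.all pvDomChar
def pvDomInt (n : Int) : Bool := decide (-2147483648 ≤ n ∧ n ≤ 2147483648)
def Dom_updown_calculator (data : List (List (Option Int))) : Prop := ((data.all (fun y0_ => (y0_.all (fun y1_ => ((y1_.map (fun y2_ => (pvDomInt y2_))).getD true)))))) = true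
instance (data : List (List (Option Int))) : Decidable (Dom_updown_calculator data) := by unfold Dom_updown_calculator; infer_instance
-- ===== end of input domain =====

-- B replaces A's per-element backward rescan for the previous non-None close
-- with one forward pass carrying the last non-None close (objective: simpler).

-- ===== PORT A =====

-- data[i][0]; a missing row/element is a Python IndexError, excluded by Pre_ (default some 0 is never the claimed value)
def pvCell (data : List (List (Option Int))) (i : Nat) : Option Int :=
  (data.getD i []).getD 0 (some 0)

-- inner while: count += 1 while i-count > 0 and data[i-count][0] == None
def pvBack (data : List (List (Option Int))) (i count : Nat) : Nat :=
  if 0 < i - count ∧ pvCell data (i - count) = none then pvBack data i (count + 1) else count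
termination_by i - count
decreasing_by omega

-- outer while(i<j) loop; up/down carried exactly as in A
def pvALoop (data : List (List (Option Int))) (j i : Nat) (up down : Int)
    (uM dM : List (Option Int)) : List (Option Int) × List (Option Int) :=
  if i < j then
    if pvCell data i = none then
      pvALoop data j (i + 1) up down (uM ++ [none]) (dM ++ [none])
    else
      let count := pvBack data i 1
      if (i : Int) - count < 0 then
        pvALoop data j (i + 1) up down (uM ++ [none]) (dM ++ [none])
      else
        let close := (pvCell data i).getD 0
        -- Python raises TypeError when this previous cell is None; excluded by Pre_
        let prev := (pvCell data (i - count)).getD 0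
        let ud : Int × Int :=
          if close = prev then (0, 0)
          else if close > prev then (close - prev, 0)
          else (0, prev - close)
        pvALoop data j (i + 1) ud.1 ud.2 (uM ++ [some ud.1]) (dM ++ [some ud.2])
  else (uM, dM)
termination_by j - i
decreasing_by all_goals omega

def updown_calculator (data : List (List (Option Int))) : List (Option Int) × List (Option Int) :=
  pvALoop data data.length 0 0 0 [] []

-- ===== PORT B =====

-- one iteration of B's for-loop; state = (prev, upMoves, downMoves)
def pvBStep (st : Option Int × List (Option Int) × List (Option Int)) (row : List (Option Int)) :
    Option Int × List (Option Int) × List (Option Int) :=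
  -- close := row[0] (IndexError on an empty row, excluded by Pre_), matched together with prev
  match row.getD 0 (some 0), st with
  | some c, (some p, uM, dM) =>
      (some c, uM ++ [some (max (c - p) 0)], dM ++ [some (max (p - c) 0)])
  | some c, (none, uM, dM) => (some c, uM ++ [none], dM ++ [none])
  | none, (prev, uM, dM) => (prev, uM ++ [none], dM ++ [none])

def updown_calculator_alt (data : List (List (Option Int))) : List (Option Int) × List (Option Int) :=
  (data.foldl pvBStep (none, [], [])).2

-- ===== PRECONDITION & SPEC =====
-- Pre_ excludes exactly the inputs where A raises: a row without a first element (IndexError),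
-- and a first close that is None followed by some non-None close (TypeError comparing int with None).
def Pre_updown_calculator (data : List (List (Option Int))) : Prop :=
  (∀ r ∈ data, r ≠ []) ∧
    ((data.headD []).head? ≠ some none ∨ ∀ s ∈ data.tail, s.head? = some none)
instance (data : List (List (Option Int))) : Decidable (Pre_updown_calculator data) := by
  unfold Pre_updown_calculator; infer_instance

def pvWitness_updown_calculator : List (List (Option Int)) := [[some 3], [some 5], [none], [some 2]]

-- On inputs whose first close is None but a later close is non-None, A raises TypeError
-- ('>' between int and None); B returns None moves until the first non-None close and real moves after.
def Raises_updown_calculator (data : List (List (Option Int))) : Prop :=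
  (∀ r ∈ data, r ≠ []) ∧
    ((data.headD []).head? = some none ∧ ∃ s ∈ data.tail, s.head? ≠ some none)
instance (data : List (List (Option Int))) : Decidable (Raises_updown_calculator data) := by
  unfold Raises_updown_calculator; infer_instance

def pvRaiseWitness_updown_calculator : List (List (Option Int)) := [[none], [some 5], [some 3]]
def pvRaiseWitnessOut_updown_calculator : List (Option Int) × List (Option Int) :=
  ([none, none, some 0], [none, none, some 2])

def Spec_updown_calculator (data : List (List (Option Int))) (out : List (Option Int) × List (Option Int)) : Prop := out = updown_calculator_alt data
instance (data : List (List (Option Int))) (out : List (Option Int) × List (Option Int)) : Decidable (Spec_updown_calculator data out) := by unfold Spec_updown_calculator; infer_instance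

-- ===== CLAIM (what is proved, stated in full; the proofs are below) =====
def Claim_equal_updown_calculator : Prop := ∀ (data : List (List (Option Int))), Dom_updown_calculator data → Pre_updown_calculator data → Spec_updown_calculator data (updown_calculator data)
def Claim_raises_updown_calculator : Prop :=
  (∀ (data : List (List (Option Int))), Dom_updown_calculator data → Raises_updown_calculator data → ¬ Pre_updown_calculator data) ∧
  (Dom_updown_calculator pvRaiseWitness_updown_calculator ∧ Raises_updown_calculator pvRaiseWitness_updown_calculator ∧
   updown_calculator_alt pvRaiseWitness_updown_calculator = pvRaiseWitnessOut_updown_calculator)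

-- ===== LEMMAS AND PROOFS =====

-- common reference spec over the list of first-column cells
def pvCells (data : List (List (Option Int))) : List (Option Int) :=
  data.map (fun r => r.getD 0 (some 0))

def pvSpec (p : Option Int) : List (Option Int) → List (Option Int) × List (Option Int)
  | [] => ([], [])
  | c :: cs =>
    let rest := pvSpec (if c = none then p else c) cs
    match c, p with
    | some cl, some pr => (some (max (cl - pr) 0) :: rest.1, some (max (pr - cl) 0) :: rest.2)
    | _, _ => (none :: rest.1, none :: rest.2)

-- last non-None cell among the first i ones, the value A's backward scan looks for
def pvPrev (data : List (List (Option Int))) : Nat → Option Int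
  | 0 => none
  | i + 1 => if pvCell data i = none then pvPrev data i else pvCell data i

theorem pvBack_le (data : List (List (Option Int))) :
    ∀ k i c, c ≤ i → i - c ≤ k → pvBack data i c ≤ i := by
  intro k
  induction k with
  | zero =>
    intro i c hc hk
    rw [pvBack, if_neg]
    · exact hc
    · rintro ⟨h1, _⟩; omega
  | succ k IH =>
    intro i c hc hk
    rw [pvBack]
    split_ifs with h
    · exact IH i (c + 1) (by omega) (by omega)
    · exact hc

theorem pvBack_shift (data : List (List (Option Int))) :
    ∀ k i c, i - c ≤ k → pvBack data (i + 1) (c + 1) = pvBack data i c + 1 := by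
  intro k
  induction k with
  | zero =>
    intro i c hk
    have hL : pvBack data (i + 1) (c + 1) = c + 1 := by
      rw [pvBack, if_neg]; rintro ⟨h1, _⟩; omega
    have hR : pvBack data i c = c := by
      rw [pvBack, if_neg]; rintro ⟨h1, _⟩; omega
    rw [hL, hR]
  | succ k IH =>
    intro i c hk
    have he : i + 1 - (c + 1) = i - c := by omega
    by_cases h : 0 < i - c ∧ pvCell data (i - c) = none
    · have hL : pvBack data (i + 1) (c + 1) = pvBack data (i + 1) (c + 1 + 1) := by
        conv_lhs => rw [pvBack]
        rw [he, if_pos h]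
      have hR : pvBack data i c = pvBack data i (c + 1) := by
        conv_lhs => rw [pvBack]
        rw [if_pos h]
      rw [hL, hR]
      exact IH i (c + 1) (by omega)
    · have hL : pvBack data (i + 1) (c + 1) = c + 1 := by
        conv_lhs => rw [pvBack]
        rw [he, if_neg h]
      have hR : pvBack data i c = c := by
        conv_lhs => rw [pvBack]
        rw [if_neg h]
      rw [hL, hR]

theorem pvPrevIdx (data : List (List (Option Int))) (h0 : pvCell data 0 ≠ none) :
    ∀ i, 1 ≤ i → pvCell data (i - pvBack data i 1) = pvPrev data i ∧ pvPrev data i ≠ none := by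
  intro i
  induction i with
  | zero => omega
  | succ i IH =>
    intro _
    by_cases hi : 1 ≤ i
    · cases hfi : pvCell data i with
      | none =>
        have hb : pvBack data (i + 1) 1 = pvBack data i 1 + 1 := by
          rw [pvBack, if_pos]
          · exact pvBack_shift data (i - 1) i 1 (by omega)
          · constructor
            · omega
            · simpa using hfi
        have hle : pvBack data i 1 ≤ i := pvBack_le data i i 1 hi (by omega)
        have hidx : i + 1 - (pvBack data i 1 + 1) = i - pvBack data i 1 := by omega
        rw [hb, hidx]
        have := IH hi
        simpa [pvPrev, hfi] using this
      | some v =>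
        have hb : pvBack data (i + 1) 1 = 1 := by
          rw [pvBack, if_neg]
          rintro ⟨_, hcn⟩
          simp [hfi] at hcn
        rw [hb]
        simp [pvPrev, hfi]
    · have hz : i = 0 := by omega
      subst hz
      have hb : pvBack data 1 1 = 1 := by
        rw [pvBack, if_neg]
        rintro ⟨h1, _⟩; omega
      rw [hb]
      cases hfi : pvCell data 0 with
      | none => exact absurd hfi h0
      | some v => simp [pvPrev, hfi]

theorem pvB_fold :
    ∀ (rows : List (List (Option Int))) (p : Option Int) (u d : List (Option Int)),
      (rows.foldl pvBStep (p, u, d)).2 =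
        (u ++ (pvSpec p (rows.map (fun r => r.getD 0 (some 0)))).1,
         d ++ (pvSpec p (rows.map (fun r => r.getD 0 (some 0)))).2) := by
  intro rows
  induction rows with
  | nil => intro p u d; simp [pvSpec]
  | cons r rows IH =>
    intro p u d
    cases hc : r.getD 0 (some 0) with
    | none =>
      cases p with
      | none =>
        simp only [List.foldl_cons, List.map_cons, pvBStep, hc]
        rw [IH]
        simp only [pvSpec]
        simp
      | some pr =>
        simp only [List.foldl_cons, List.map_cons, pvBStep, hc]
        rw [IH]
        simp only [pvSpec]
        simp
    | some c =>
      cases p with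
      | none =>
        simp only [List.foldl_cons, List.map_cons, pvBStep, hc]
        rw [IH]
        simp only [pvSpec]
        simp
      | some pr =>
        simp only [List.foldl_cons, List.map_cons, pvBStep, hc]
        rw [IH]
        simp only [pvSpec]
        simp

theorem pvCells_length (data : List (List (Option Int))) :
    (pvCells data).length = data.length := by simp [pvCells]

theorem pvCells_drop (data : List (List (Option Int))) (i : Nat) (h : i < data.length) :
    (pvCells data).drop i = pvCell data i :: (pvCells data).drop (i + 1) := by
  rw [List.drop_eq_getElem_cons (by simpa [pvCells] using h)]
  congr 1
  simp [pvCells, pvCell, List.getD_eq_getElem?_getD, List.getElem?_eq_getElem h]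

theorem pvA_loop (data : List (List (Option Int))) (h0 : pvCell data 0 ≠ none) :
    ∀ n i up down u d, i + n = data.length →
      pvALoop data data.length i up down u d =
        (u ++ (pvSpec (pvPrev data i) ((pvCells data).drop i)).1,
         d ++ (pvSpec (pvPrev data i) ((pvCells data).drop i)).2) := by
  intro n
  induction n with
  | zero =>
    intro i up down u d hi
    rw [pvALoop, if_neg (by omega)]
    rw [List.drop_eq_nil_of_le (by simp [pvCells_length]; omega)]
    simp [pvSpec]
  | succ n IH =>
    intro i up down u d hi
    have hlt : i < data.length := by omega
    have hdrop := pvCells_drop data i hlt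
    rw [pvALoop, if_pos hlt]
    cases hc : pvCell data i with
    | none =>
      rw [if_pos rfl]
      rw [IH (i + 1) up down _ _ (by omega)]
      have hp : pvPrev data (i + 1) = pvPrev data i := by simp [pvPrev, hc]
      rw [hp, hdrop]
      cases hpv : pvPrev data i with
      | none => simp [pvSpec, hc, List.append_assoc]
      | some pr => simp [pvSpec, hc, List.append_assoc]
    | some cl =>
      rw [if_neg (by simp)]
      by_cases hiz : i = 0
      · subst hiz
        have hb : pvBack data 0 1 = 1 := by
          rw [pvBack, if_neg]; rintro ⟨h1, _⟩; omega
        rw [hb, if_pos (by norm_num)]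
        rw [IH 1 up down _ _ (by omega)]
        have hp : pvPrev data 1 = some cl := by simp [pvPrev, hc]
        have hp0 : pvPrev data 0 = none := rfl
        rw [hp, hdrop, hp0, hc]
        simp [pvSpec, List.append_assoc]
      · have h1i : 1 ≤ i := by omega
        have hle : pvBack data i 1 ≤ i := pvBack_le data i i 1 h1i (by omega)
        rw [if_neg (by omega)]
        obtain ⟨hcellp, hpne⟩ := pvPrevIdx data h0 i h1i
        cases hpv : pvPrev data i with
        | none => exact absurd hpv hpne
        | some pr =>
          rw [hpv] at hcellp
          have hp : pvPrev data (i + 1) = some cl := by simp [pvPrev, hc]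
          have hud : (if cl = pr then ((0 : Int), (0 : Int))
              else if cl > pr then (cl - pr, 0) else (0, pr - cl)) =
              (max (cl - pr) 0, max (pr - cl) 0) := by
            split_ifs with h1 h2 <;> (simp only [Prod.mk.injEq]; constructor <;> omega)
          simp only [hcellp, Option.getD_some, hud]
          rw [IH (i + 1) _ _ _ _ (by omega), hp, hdrop, hc]
          simp [pvSpec, List.append_assoc]

theorem pvA_allNone (data : List (List (Option Int))) (hN : ∀ r ∈ data, r.getD 0 (some 0) = none) :
    ∀ n i up down u d, i + n = data.length →
      pvALoop data data.length i up down u d =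
        (u ++ List.replicate n none, d ++ List.replicate n none) := by
  intro n
  induction n with
  | zero =>
    intro i up down u d hi
    rw [pvALoop, if_neg (by omega)]
    simp
  | succ n IH =>
    intro i up down u d hi
    have hlt : i < data.length := by omega
    have hc : pvCell data i = none := by
      have hmem : data.getD i [] ∈ data := by
        rw [List.getD_eq_getElem?_getD, List.getElem?_eq_getElem hlt]
        exact List.getElem_mem hlt
      exact hN _ hmem
    rw [pvALoop, if_pos hlt, if_pos hc]
    rw [IH (i + 1) up down _ _ (by omega)]
    simp [List.replicate_succ, List.append_assoc]

theorem pvSpec_allNone : ∀ (cs : List (Option Int)) (p : Option Int), (∀ c ∈ cs, c = none) →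
    pvSpec p cs = (List.replicate cs.length none, List.replicate cs.length none) := by
  intro cs
  induction cs with
  | nil => intro p _; simp [pvSpec]
  | cons c cs IH =>
    intro p h
    have hc : c = none := h c (by simp)
    subst hc
    cases p with
    | none => simp [pvSpec, IH _ (fun x hx => h x (by simp [hx])), List.replicate_succ]
    | some pr => simp [pvSpec, IH _ (fun x hx => h x (by simp [hx])), List.replicate_succ]

theorem pvAlt_spec (data : List (List (Option Int))) :
    updown_calculator_alt data = ((pvSpec none (pvCells data)).1, (pvSpec none (pvCells data)).2) := by
  unfold updown_calculator_alt
  rw [pvB_fold data none [] []]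
  simp [pvCells]

-- ===== VERDICT (by name: the statement is the Claim_ definition above) =====
theorem updown_calculator_spec : Claim_equal_updown_calculator := by
  intro data _ hpre
  unfold Spec_updown_calculator
  rcases hpre with ⟨hne, hdisj⟩
  rw [pvAlt_spec]
  by_cases h0 : pvCell data 0 = none
  · -- first cell is None (or data empty): every cell is None
    have hall : ∀ r ∈ data, r.getD 0 (some 0) = none := by
      cases data with
      | nil => intro r hr; simp at hr
      | cons r t =>
        intro s hs
        have hr : r ≠ [] := hne r (by simp)
        cases r with
        | nil => exact absurd rfl hr
        | cons x xs =>
          have hx : x = none := by simpa [pvCell] using h0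
          rcases List.mem_cons.mp hs with rfl | hs'
          · simp [hx]
          · rcases hdisj with hd | hd
            · simp [hx] at hd
            · have hh := hd s (by simpa using hs')
              have hsne : s ≠ [] := hne s hs
              cases s with
              | nil => exact absurd rfl hsne
              | cons y ys => simp at hh; simp [hh]
    have hcells : ∀ c ∈ pvCells data, c = none := by
      intro c hc
      rcases List.mem_map.mp hc with ⟨r, hr, rfl⟩
      exact hall r hr
    rw [pvSpec_allNone _ none hcells]
    unfold updown_calculator
    rw [pvA_allNone data hall data.length 0 0 0 [] [] (by omega)]
    simp [pvCells_length]
  · unfold updown_calculator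
    rw [pvA_loop data h0 data.length 0 0 0 [] [] (by omega)]
    simp [pvPrev]

theorem updown_calculator_raises : Claim_raises_updown_calculator := by
  unfold Claim_raises_updown_calculator
  refine ⟨?_, by decide⟩
  rintro data _ ⟨hne, hhead, s, hs, hsne⟩ ⟨hne', hdisj⟩
  rcases hdisj with hd | hd
  · exact hd hhead
  · exact hsne (hd s hs)

-- self-check: the crash-fix region really lies outside Pre_ at the raise witness
theorem updown_calculator_raises_witness_ok :
    ¬ Pre_updown_calculator pvRaiseWitness_updown_calculator := by
  have h := updown_calculator_raises
  unfold Claim_raises_updown_calculator at h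
  exact h.1 _ h.2.1 h.2.2.1
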